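-- pv_equiv track=rewrite | github.com/cha2hyun/TIL | Etc/softwaremaestro_6/main.py | solution
-- ===== SOURCE A (Python) =====
-- def solution(arr):
--     cnt = 0
--     while True:
--         if len(arr) == 1:
--             break
--
--         half = len(arr)//2
--         left = arr[:half]
--         right = arr[half:]
--
--         if max(left) > max(right):
--             arr = right
--             cnt += max(left)
--         else:
--             arr = left
--             cnt += max(right)
--
--     return cnt
-- ===== SOURCE B (Python) =====
-- def solution(arr):
--     def rng_max(lo, hi):
--         m = arr[lo]
--         for i in range(lo + 1, hi):
--             if arr[i] > m:
--                 m = arr[i]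
--         return m
--
--     def go(lo, hi):
--         if hi - lo <= 1:
--             return 0
--         mid = lo + (hi - lo) // 2
--         ml = rng_max(lo, mid)
--         mr = rng_max(mid, hi)
--         if ml > mr:
--             return ml + go(mid, hi)
--         return mr + go(lo, mid)
--
--     return go(0, len(arr))
-- ===== Notes on version B (the rewrite author's own statement) =====
-- stated objective: alternative
-- what changed: Replaced A's while-loop that repeatedly slices the list and calls max() by a recursion over (lo,hi) index ranges of the original array with a hand-written running-max scan, so no sublists are ever materialised.
-- outside the precondition, e.g. on solution([]): A raises ValueError, B returns 0
import Mathlib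
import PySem

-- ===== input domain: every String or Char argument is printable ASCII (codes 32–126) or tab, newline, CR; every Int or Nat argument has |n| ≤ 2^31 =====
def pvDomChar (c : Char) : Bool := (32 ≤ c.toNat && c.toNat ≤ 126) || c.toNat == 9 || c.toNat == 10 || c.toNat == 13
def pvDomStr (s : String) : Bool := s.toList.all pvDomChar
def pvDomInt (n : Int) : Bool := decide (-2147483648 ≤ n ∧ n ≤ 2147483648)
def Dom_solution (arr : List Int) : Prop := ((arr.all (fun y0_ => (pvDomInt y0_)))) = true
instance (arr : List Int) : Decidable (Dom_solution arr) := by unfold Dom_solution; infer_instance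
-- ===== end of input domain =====

-- B replaces A's list-slicing while-loop by a recursion over (lo,hi) index ranges of the
-- original array, with a hand-written running-max scan instead of max() (objective: alternative).

-- termination helpers for PORT A (cited in decreasing_by): if max(arr[:len//2]) exists
-- and len ≠ 1, then 2 ≤ len, and both halves are strictly shorter
theorem pvLenTwo (arr : List Int) (ml : Int) (hne : arr.length ≠ 1)
    (h : PySem.List.max? (PySem.List.slice arr none (some ((arr.length / 2 : Nat) : Int)))
      (fun y => y) = some ml) : 2 ≤ arr.length := by
  rcases arr with _ | ⟨a, t⟩
  · rw [PySem.List.slice_to_natCast] at h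
    rw [(PySem.List.max?_eq_none_iff _ _).mpr (by simp)] at h
    simp at h
  · simp only [List.length_cons] at *; omega

theorem pvLeftLt (arr : List Int) (h : 2 ≤ arr.length) :
    (PySem.List.slice arr none (some ((arr.length / 2 : Nat) : Int))).length < arr.length := by
  rw [PySem.List.slice_to_natCast, List.length_take]; omega

theorem pvRightLt (arr : List Int) (h : 2 ≤ arr.length) :
    (PySem.List.slice arr (some ((arr.length / 2 : Nat) : Int)) none).length < arr.length := by
  rw [PySem.List.slice_from_natCast, List.length_drop]; omega

-- ===== PORT A =====
-- A's while-loop, with its accumulator cnt; the `none` match arms are where Python's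
-- max([]) raises ValueError (excluded by Pre_solution)
def solutionLoopA (arr : List Int) (cnt : Int) : Int :=
  if h0 : (arr.length == 1) = true then cnt
  else
    let half : Nat := arr.length / 2
    let left := PySem.List.slice arr none (some (half : Int))
    let right := PySem.List.slice arr (some (half : Int)) none
    match h1 : PySem.List.max? left (fun y => y), h2 : PySem.List.max? right (fun y => y) with
    | some ml, some mr =>
        if ml > mr then solutionLoopA right (cnt + ml)
        else solutionLoopA left (cnt + mr)
    | _, _ => cnt
termination_by arr.length
decreasing_by
  · exact pvRightLt arr (pvLenTwo arr ml (by simpa using h0) h1)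
  · exact pvLeftLt arr (pvLenTwo arr ml (by simpa using h0) h1)

def solution (arr : List Int) : Int := solutionLoopA arr 0

-- ===== PORT B =====
-- rng_max(lo, hi): running-max loop over arr[lo..hi); exact for lo < hi ≤ arr.length
-- (every index Python reads is then in range, so pyGetD's default is never used)
def rngMaxB (arr : List Int) (lo hi : Nat) : Int :=
  (PySem.List.pyRange ((lo : Int) + 1) (hi : Int) 1).foldl
    (fun m i => let x := PySem.List.pyGetD arr i 0; if x > m then x else m)
    (PySem.List.pyGetD arr (lo : Int) 0)

def solutionGoB (arr : List Int) (lo hi : Nat) : Int :=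
  if hi - lo ≤ 1 then 0
  else
    let mid := lo + (hi - lo) / 2
    let ml := rngMaxB arr lo mid
    let mr := rngMaxB arr mid hi
    if ml > mr then ml + solutionGoB arr mid hi
    else mr + solutionGoB arr lo mid
termination_by hi - lo
decreasing_by all_goals omega

def solution_alt (arr : List Int) : Int := solutionGoB arr 0 arr.length

-- ===== PRECONDITION & SPEC =====
-- Pre_ excludes only the empty list, on which A raises ValueError at max([]).
def Pre_solution (arr : List Int) : Prop := arr ≠ []
instance (arr : List Int) : Decidable (Pre_solution arr) := by unfold Pre_solution; infer_instance
def pvWitness_solution : List Int := [3, 1, 4, 1, 5]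

def Spec_solution (arr : List Int) (out : Int) : Prop := out = solution_alt arr
instance (arr : List Int) (out : Int) : Decidable (Spec_solution arr out) := by unfold Spec_solution; infer_instance

-- ===== CLAIM (what is proved, stated in full; the proofs are below) =====
def Claim_equal_solution : Prop := ∀ (arr : List Int), Dom_solution arr → Pre_solution arr → Spec_solution arr (solution arr)

-- ===== LEMMAS AND PROOFS =====

-- reading arr[lo..hi) by index is the segment (arr.drop lo).take (hi - lo)
theorem mapGet_pyRange (arr : List Int) : ∀ n lo hi : Nat, hi - lo ≤ n → hi ≤ arr.length →
    (PySem.List.pyRange (lo : Int) (hi : Int) 1).map (fun i => PySem.List.pyGetD arr i 0)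
      = (arr.drop lo).take (hi - lo) := by
  intro n
  induction n with
  | zero =>
    intro lo hi h hlen
    have h0 : hi - lo = 0 := by omega
    rw [h0]
    have : ¬ ((lo : Int) < (hi : Int)) := by exact_mod_cast not_lt.mpr (by omega : hi ≤ lo)
    simp [PySem.List.pyRange, this]
  | succ n ih =>
    intro lo hi h hlen
    by_cases hlt : lo < hi
    · have hlo : lo < arr.length := by omega
      rw [PySem.List.pyRange_one_cons (by exact_mod_cast hlt)]
      rw [List.map_cons]
      have : ((lo : Int) + 1) = ((lo + 1 : Nat) : Int) := by push_cast; ring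
      rw [this, ih (lo + 1) hi (by omega) hlen]
      rw [List.drop_eq_getElem_cons hlo]
      have h2 : hi - lo = (hi - (lo + 1)) + 1 := by omega
      rw [h2, List.take_succ_cons]
      simp [PySem.List.pyGetD_natCast, List.getD, hlo]
    · have h0 : hi - lo = 0 := by omega
      rw [h0]
      have : ¬ ((lo : Int) < (hi : Int)) := by exact_mod_cast not_lt.mpr (by omega)
      simp [PySem.List.pyRange, this]

theorem maxIte (m x : Int) : (if x > m then x else m) = max m x := by
  rw [max_def]; split_ifs <;> omega

-- B's running-max scan computes exactly max() of the segment
theorem rngMaxB_eq_max? (arr : List Int) (lo hi : Nat) (hlt : lo < hi) (hlen : hi ≤ arr.length) :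
    PySem.List.max? ((arr.drop lo).take (hi - lo)) (fun y => y) = some (rngMaxB arr lo hi) := by
  have hseg := mapGet_pyRange arr (hi - lo) lo hi le_rfl hlen
  have hseg' := mapGet_pyRange arr (hi - (lo + 1)) (lo + 1) hi le_rfl hlen
  have hlo : lo < arr.length := by omega
  have hcons : (arr.drop lo).take (hi - lo)
      = PySem.List.pyGetD arr (lo : Int) 0 :: (arr.drop (lo + 1)).take (hi - (lo + 1)) := by
    rw [List.drop_eq_getElem_cons hlo]
    have h2 : hi - lo = (hi - (lo + 1)) + 1 := by omega
    rw [h2, List.take_succ_cons]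
    simp [PySem.List.pyGetD_natCast, List.getD, hlo]
  rw [hcons, PySem.List.max?_id_cons]
  congr 1
  unfold rngMaxB
  have hc : ((lo : Int) + 1) = ((lo + 1 : Nat) : Int) := by push_cast; ring
  rw [hc, ← hseg']
  simp only [maxIte, List.foldl_map]

-- one unfolding step of A's loop when both halves are nonempty
theorem loopA_step (a : List Int) (cnt ml mr : Int) (hne : a.length ≠ 1)
    (h1 : PySem.List.max? (PySem.List.slice a none (some ((a.length / 2 : Nat) : Int))) (fun y => y) = some ml)
    (h2 : PySem.List.max? (PySem.List.slice a (some ((a.length / 2 : Nat) : Int)) none) (fun y => y) = some mr) :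
    solutionLoopA a cnt =
      if ml > mr then solutionLoopA (PySem.List.slice a (some ((a.length / 2 : Nat) : Int)) none) (cnt + ml)
      else solutionLoopA (PySem.List.slice a none (some ((a.length / 2 : Nat) : Int))) (cnt + mr) := by
  rw [solutionLoopA]
  simp only [beq_iff_eq, hne, dif_neg, not_false_iff]
  cases hml : PySem.List.max? (PySem.List.slice a none (some ((a.length / 2 : Nat) : Int))) (fun y => y) with
  | none => rw [hml] at h1; simp at h1
  | some ml' =>
    cases hmr : PySem.List.max? (PySem.List.slice a (some ((a.length / 2 : Nat) : Int)) none) (fun y => y) with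
    | none => rw [hmr] at h2; simp at h2
    | some mr' =>
      rw [hml] at h1; rw [hmr] at h2
      cases h1; cases h2; rfl

-- A's loop on the segment (lo,hi) equals cnt plus B's index recursion
theorem loopA_eq_goB (arr : List Int) : ∀ n lo hi : Nat, hi - lo ≤ n → lo < hi → hi ≤ arr.length →
    ∀ cnt : Int, solutionLoopA ((arr.drop lo).take (hi - lo)) cnt = cnt + solutionGoB arr lo hi := by
  intro n
  induction n with
  | zero => intro lo hi h hlt; omega
  | succ n ih =>
    intro lo hi h hlt hlen cnt
    have hlensub : ((arr.drop lo).take (hi - lo)).length = hi - lo := by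
      rw [List.length_take, List.length_drop]; omega
    by_cases hone : hi - lo = 1
    · have hc : ((((arr.drop lo).take (hi - lo)).length == 1) = true) := by
        rw [hlensub, hone]; rfl
      rw [solutionLoopA, dif_pos hc, solutionGoB, if_pos (by omega)]; ring
    · have hmid1 : lo < lo + (hi - lo) / 2 := by omega
      have hmid2 : lo + (hi - lo) / 2 < hi := by omega
      have hleft : PySem.List.slice ((arr.drop lo).take (hi - lo)) none (some (((hi - lo) / 2 : Nat) : Int))
          = (arr.drop lo).take ((lo + (hi - lo) / 2) - lo) := by
        rw [PySem.List.slice_to_natCast, List.take_take]; congr 1; omega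
      have hright : PySem.List.slice ((arr.drop lo).take (hi - lo)) (some (((hi - lo) / 2 : Nat) : Int)) none
          = (arr.drop (lo + (hi - lo) / 2)).take (hi - (lo + (hi - lo) / 2)) := by
        rw [PySem.List.slice_from_natCast, List.drop_take, List.drop_drop]; congr 1 <;> omega
      have hml := rngMaxB_eq_max? arr lo (lo + (hi - lo) / 2) hmid1 (by omega)
      have hmr := rngMaxB_eq_max? arr (lo + (hi - lo) / 2) hi hmid2 hlen
      rw [loopA_step ((arr.drop lo).take (hi - lo)) cnt
            (rngMaxB arr lo (lo + (hi - lo) / 2)) (rngMaxB arr (lo + (hi - lo) / 2) hi)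
            (by omega) (by rw [hlensub, hleft]; exact hml) (by rw [hlensub, hright]; exact hmr)]
      rw [hlensub, hleft, hright, solutionGoB, if_neg (by omega : ¬ hi - lo ≤ 1)]
      by_cases hgt : rngMaxB arr lo (lo + (hi - lo) / 2) > rngMaxB arr (lo + (hi - lo) / 2) hi
      · rw [if_pos hgt, if_pos hgt, ih _ hi (by omega) hmid2 hlen]; ring
      · rw [if_neg hgt, if_neg hgt, ih lo _ (by omega) hmid1 (by omega)]; ring

-- ===== VERDICT (by name: the statement is the Claim_ definition above) =====
theorem solution_spec : Claim_equal_solution := by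
  intro arr _ hpre
  unfold Spec_solution solution solution_alt
  have hlt : 0 < arr.length := List.length_pos_iff.mpr hpre
  have := loopA_eq_goB arr arr.length 0 arr.length le_rfl hlt le_rfl 0
  simpa using this
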